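-- pv_equiv track=rewrite | github.com/paulequilibrio/sway-simple-overlay | sway-simple-overlay.py | match_monitor_config
-- ===== SOURCE A (Python) =====
-- def match_monitor_config(output_name, configs):
--     for conf in configs:
--         if conf.get("name") == output_name:
--             return conf
--     for conf in configs:
--         if conf.get("name") == "default":
--             return conf
--     return configs[0] if configs else {}
-- ===== SOURCE B (Python) =====
-- def match_monitor_config(output_name, configs):
--     # Single fold: keep the highest-ranked candidate seen so far (strict
--     # improvement keeps the leftmost among equals). Rank 2 = name match,
--     # 1 = named "default", 0 = anything else; start below everything.
--     best, best_rank = {}, -1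
--     for conf in configs:
--         name = conf.get("name")
--         rank = 2 if name == output_name else 1 if name == "default" else 0
--         if rank > best_rank:
--             best, best_rank = conf, rank
--     return best
-- ===== Notes on version B (the rewrite author's own statement) =====
-- stated objective: alternative
-- what changed: Replaces A's two sequential find-scans with a single fold that maximizes a rank (2 = name match, 1 = 'default', 0 = other) with strict improvement so the leftmost best candidate is kept.
import Mathlib
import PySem

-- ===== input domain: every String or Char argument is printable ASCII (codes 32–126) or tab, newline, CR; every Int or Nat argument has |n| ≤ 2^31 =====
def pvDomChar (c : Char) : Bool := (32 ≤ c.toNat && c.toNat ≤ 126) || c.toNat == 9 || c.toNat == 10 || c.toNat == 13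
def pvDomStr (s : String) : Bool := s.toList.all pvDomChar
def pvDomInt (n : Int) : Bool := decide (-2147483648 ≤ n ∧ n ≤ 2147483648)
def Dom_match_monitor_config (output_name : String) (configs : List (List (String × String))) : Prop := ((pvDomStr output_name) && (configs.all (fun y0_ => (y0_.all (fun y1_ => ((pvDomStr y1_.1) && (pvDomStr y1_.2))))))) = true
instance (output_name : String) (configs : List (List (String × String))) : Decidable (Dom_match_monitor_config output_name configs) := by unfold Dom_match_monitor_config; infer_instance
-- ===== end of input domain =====

-- ===== PORT A =====
-- B replaces A's two sequential find-scans by a single fold that keeps the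
-- highest-ranked candidate (2 = name match, 1 = 'default', 0 = other),
-- strict improvement keeping the leftmost; same O(n), different decomposition.
def mmcA_find (key : String) (configs : List (List (String × String))) :
    Option (List (String × String)) :=
  match configs with
  | [] => none
  | conf :: rest =>
      if (PySem.Dict.mk conf).get? "name" == some key then some conf
      else mmcA_find key rest

def match_monitor_config (output_name : String) (configs : List (List (String × String))) : List (String × String) :=
  match mmcA_find output_name configs with
  | some conf => conf
  | none =>
    match mmcA_find "default" configs with
    | some conf => conf
    | none => match configs with
      | [] => []
      | conf :: _ => conf

-- ===== PORT B =====
def mmcB_rank (output_name : String) (conf : List (String × String)) : Int :=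
  let name := (PySem.Dict.mk conf).get? "name"
  if name == some output_name then 2 else if name == some "default" then 1 else 0

def mmcB_scan (output_name : String) (best : List (String × String)) (bestRank : Int)
    (configs : List (List (String × String))) : List (String × String) :=
  match configs with
  | [] => best
  | conf :: rest =>
      let r := mmcB_rank output_name conf
      if r > bestRank then mmcB_scan output_name conf r rest
      else mmcB_scan output_name best bestRank rest

def match_monitor_config_alt (output_name : String) (configs : List (List (String × String))) : List (String × String) :=
  mmcB_scan output_name [] (-1) configs

-- ===== PRECONDITION & SPEC =====
def Spec_match_monitor_config (output_name : String) (configs : List (List (String × String))) (out : List (String × String)) : Prop := out = match_monitor_config_alt output_name configs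
instance (output_name : String) (configs : List (List (String × String))) (out : List (String × String)) : Decidable (Spec_match_monitor_config output_name configs out) := by unfold Spec_match_monitor_config; infer_instance

-- ===== CLAIM =====
def Claim_equal_match_monitor_config : Prop := ∀ (output_name : String) (configs : List (List (String × String))), Dom_match_monitor_config output_name configs → Spec_match_monitor_config output_name configs (match_monitor_config output_name configs)

-- ===== LEMMAS AND PROOFS =====

lemma mmcB_rank_le_two (o : String) (conf : List (String × String)) :
    mmcB_rank o conf ≤ 2 := by
  unfold mmcB_rank; dsimp only; split_ifs <;> omega

lemma mmcB_scan_top (o : String) (b : List (String × String))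
    (cs : List (List (String × String))) :
    mmcB_scan o b 2 cs = b := by
  induction cs with
  | nil => rfl
  | cons conf rest ih =>
    have h := mmcB_rank_le_two o conf
    simp only [mmcB_scan]
    rw [if_neg (by omega)]
    exact ih

lemma mmcB_scan_one (o : String) (b : List (String × String))
    (cs : List (List (String × String))) :
    mmcB_scan o b 1 cs = (mmcA_find o cs).getD b := by
  induction cs generalizing b with
  | nil => rfl
  | cons conf rest ih =>
    simp only [mmcB_scan, mmcA_find]
    by_cases h : ((PySem.Dict.mk conf).get? "name" == some o) = true
    · have hr : mmcB_rank o conf = 2 := by unfold mmcB_rank; simp [h]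
      rw [hr, if_pos (by omega), mmcB_scan_top]
      simp [h]
    · have hr : mmcB_rank o conf ≤ 1 := by
        unfold mmcB_rank; dsimp only; rw [if_neg h]; split_ifs <;> omega
      rw [if_neg (by omega), ih]
      simp [h]

lemma mmcB_scan_zero (o : String) (b : List (String × String))
    (cs : List (List (String × String))) :
    mmcB_scan o b 0 cs =
      match mmcA_find o cs with
      | some c => c
      | none => (mmcA_find "default" cs).getD b := by
  induction cs generalizing b with
  | nil => rfl
  | cons conf rest ih =>
    simp only [mmcB_scan, mmcA_find]
    by_cases h : ((PySem.Dict.mk conf).get? "name" == some o) = true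
    · have hr : mmcB_rank o conf = 2 := by unfold mmcB_rank; simp [h]
      rw [hr, if_pos (by omega), mmcB_scan_top]
      simp [h]
    · by_cases hd : ((PySem.Dict.mk conf).get? "name" == some "default") = true
      · have hr : mmcB_rank o conf = 1 := by unfold mmcB_rank; simp [h, hd]
        rw [hr, if_pos (by omega), mmcB_scan_one]
        cases mmcA_find o rest <;> simp [h, hd]
      · have hr : mmcB_rank o conf = 0 := by unfold mmcB_rank; simp [h, hd]
        rw [hr, if_neg (by omega), ih]
        simp [h, hd]

-- ===== VERDICT =====
theorem match_monitor_config_spec : Claim_equal_match_monitor_config := by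
  intro o cs _
  unfold Spec_match_monitor_config match_monitor_config match_monitor_config_alt
  cases cs with
  | nil => rfl
  | cons conf rest =>
    have hnn : 0 ≤ mmcB_rank o conf := by
      unfold mmcB_rank; dsimp only; split_ifs <;> omega
    simp only [mmcB_scan]
    rw [if_pos (by omega)]
    by_cases h : ((PySem.Dict.mk conf).get? "name" == some o) = true
    · have hr : mmcB_rank o conf = 2 := by unfold mmcB_rank; simp [h]
      rw [hr, mmcB_scan_top]
      simp [mmcA_find, h]
    · by_cases hd : ((PySem.Dict.mk conf).get? "name" == some "default") = true
      · have hr : mmcB_rank o conf = 1 := by unfold mmcB_rank; simp [h, hd]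
        rw [hr, mmcB_scan_one]
        cases hfo : mmcA_find o rest <;> simp [mmcA_find, h, hd, hfo]
      · have hr : mmcB_rank o conf = 0 := by unfold mmcB_rank; simp [h, hd]
        rw [hr, mmcB_scan_zero]
        cases hfo : mmcA_find o rest <;> cases hfd : mmcA_find "default" rest <;>
          simp [mmcA_find, h, hd, hfo, hfd]
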